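-- pv_equiv track=rewrite | github.com/Marthenn/tubes-tbfo | convertCNF.py | removeUselessPipes
-- ===== SOURCE A (Python) =====
-- def removeUselessPipes(rule):
--
--     # Remove pipe at the beginning
--     while(rule[2]=='|'):
--         temp=rule.pop(2)
--
--     # Remove pipe at the end
--     while(rule[len(rule)-1]=='|'):
--         temp=rule.pop(len(rule)-1)
--
--     # Remove duplicate pipes
--     pipe=False
--     i=2
--     while(i<len(rule)):
--         if(pipe and rule[i]=='|'):
--             temp=rule.pop(i)
--         elif(rule[i]=='|'):
--             pipe=True
--             i+=1
--         else:
--             pipe=False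
--             i+=1
--
--     return rule
-- ===== SOURCE B (Python) =====
-- def removeUselessPipes(rule):
--     head = rule[:2]
--     out = []
--     prev = True  # True at the start: drops leading pipes; also collapses pipe runs
--     for tok in rule[2:]:
--         if tok == '|':
--             if not prev:
--                 out.append(tok)
--             prev = True
--         else:
--             out.append(tok)
--             prev = False
--     while out and out[-1] == '|':
--         out.pop()
--     return head + out
-- ===== Notes on version B (the rewrite author's own statement) =====
-- stated objective: faster
-- what changed: Replaced A's three in-place pop-loops (each pop shifts the tail, O(n) per pop) by a single forward pass with a previous-was-pipe flag plus a trailing-pipe trim on the new list.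
import Mathlib
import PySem

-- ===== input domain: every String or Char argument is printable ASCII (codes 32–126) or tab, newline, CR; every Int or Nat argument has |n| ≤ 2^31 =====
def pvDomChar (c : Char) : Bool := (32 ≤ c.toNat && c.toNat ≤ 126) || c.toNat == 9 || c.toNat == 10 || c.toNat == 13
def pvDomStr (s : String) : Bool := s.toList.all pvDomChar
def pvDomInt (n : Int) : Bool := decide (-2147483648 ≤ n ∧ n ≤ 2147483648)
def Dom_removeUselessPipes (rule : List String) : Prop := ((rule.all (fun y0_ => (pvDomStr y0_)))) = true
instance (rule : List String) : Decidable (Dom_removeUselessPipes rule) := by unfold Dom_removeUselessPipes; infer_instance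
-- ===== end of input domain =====

-- B replaces A's three in-place pop-loops by one forward pass with a previous-was-pipe
-- flag plus a trailing trim (faster; equivalence is about the RETURN value only: A
-- mutates its argument in place, B builds a new list).

-- ===== PORT A =====
-- list.pop(i) with 0 ≤ i < len removes the element at i (the popped value `temp` is
-- discarded by A): the remaining list is take i ++ drop (i+1); exact in that range.
def pvPopIdx (xs : List String) (i : Nat) : List String := xs.take i ++ xs.drop (i + 1)

-- `while rule[2] == '|': rule.pop(2)`; when index 2 is out of range Python raises
-- IndexError (outside Pre_); the port stops there.
def loopA1 (rule : List String) : List String :=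
  if h : 2 < rule.length then
    if rule[2] = "|" then loopA1 (pvPopIdx rule 2) else rule
  else rule
termination_by rule.length
decreasing_by simp [pvPopIdx]; omega

-- `while rule[len(rule)-1] == '|': rule.pop(len(rule)-1)`; on the empty list Python
-- raises IndexError (outside Pre_); the port stops there.
def loopA2 (rule : List String) : List String :=
  match h : rule.getLast? with
  | some x => if x = "|" then loopA2 rule.dropLast else rule
  | none => rule
termination_by rule.length
decreasing_by
  cases rule with
  | nil => simp at h
  | cons a as => simp

-- the duplicate-pipe loop: `pipe=False; i=2; while i < len(rule): …`
def loopA3 (pipe : Bool) (i : Nat) (rule : List String) : List String :=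
  if h : i < rule.length then
    if pipe ∧ rule[i] = "|" then loopA3 pipe i (pvPopIdx rule i)
    else if rule[i] = "|" then loopA3 true (i + 1) rule
    else loopA3 false (i + 1) rule
  else rule
termination_by rule.length - i
decreasing_by
  · simp [pvPopIdx]; omega
  · omega
  · omega

def removeUselessPipes (rule : List String) : List String :=
  loopA3 false 2 (loopA2 (loopA1 rule))

-- ===== PORT B =====
-- the single forward pass over rule[2:] with the `prev` flag, accumulating `out`
def bScan (body : List String) : List String :=
  (body.foldl
    (fun (st : Bool × List String) tok =>
      if tok = "|" then (true, if st.1 then st.2 else st.2 ++ [tok])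
      else (false, st.2 ++ [tok]))
    (true, [])).2

-- `while out and out[-1] == '|': out.pop()`
def bStrip (out : List String) : List String :=
  match h : out.getLast? with
  | some x => if x = "|" then bStrip out.dropLast else out
  | none => out
termination_by out.length
decreasing_by
  cases out with
  | nil => simp at h
  | cons a as => simp

def removeUselessPipes_alt (rule : List String) : List String :=
  rule.take 2 ++ bStrip (bScan (rule.drop 2))

-- ===== PRECONDITION & SPEC =====
-- Pre_ excludes exactly the inputs on which A raises IndexError: lists in which every
-- element after the first two is '|' (in particular lists shorter than 3).
def Pre_removeUselessPipes (rule : List String) : Prop :=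
  ∃ x ∈ rule.drop 2, x ≠ "|"
instance (rule : List String) : Decidable (Pre_removeUselessPipes rule) := by
  unfold Pre_removeUselessPipes; infer_instance

def pvWitness_removeUselessPipes : List String := ["S", "->", "a", "|", "|", "b"]

def Spec_removeUselessPipes (rule : List String) (out : List String) : Prop := out = removeUselessPipes_alt rule
instance (rule : List String) (out : List String) : Decidable (Spec_removeUselessPipes rule out) := by unfold Spec_removeUselessPipes; infer_instance

-- ===== CLAIM (what is proved, stated in full; the proofs are below) =====
def Claim_equal_removeUselessPipes : Prop := ∀ (rule : List String), Dom_removeUselessPipes rule → Pre_removeUselessPipes rule → Spec_removeUselessPipes rule (removeUselessPipes rule)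


-- ===== LEMMAS AND PROOFS =====

-- reference functions used by the proofs
def collapse : Bool → List String → List String
  | _, [] => []
  | b, x :: xs =>
    if x = "|" then (if b then collapse true xs else x :: collapse true xs)
    else x :: collapse false xs

def rstrip : List String → List String
  | [] => []
  | x :: xs =>
    let ys := rstrip xs
    if ys = [] then (if x = "|" then [] else [x]) else x :: ys

theorem rstrip_eq_nil_iff (l : List String) : rstrip l = [] ↔ ∀ x ∈ l, x = "|" := by
  induction l with
  | nil => simp [rstrip]
  | cons x xs ih =>
    by_cases h1 : rstrip xs = []
    · by_cases hx : x = "|"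
      · have hall := ih.mp h1
        simp only [rstrip, h1, if_pos hx, List.mem_cons]
        constructor
        · intro _ a ha
          rcases ha with rfl | ha
          · exact hx
          · exact hall a ha
        · intro _; rfl
      · simp only [rstrip, h1, if_neg hx, List.mem_cons]
        constructor
        · intro hc; simp at hc
        · intro hc; exact absurd (hc x (Or.inl rfl)) hx
    · have hex : ∃ y ∈ xs, y ≠ "|" := by
        by_contra hc
        push_neg at hc
        exact h1 (ih.mpr hc)
      simp only [rstrip, if_neg h1]
      constructor
      · intro hc; simp at hc
      · intro hc
        rcases hex with ⟨y, hy, hne⟩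
        exact absurd (hc y (List.mem_cons_of_mem _ hy)) hne

theorem collapse_ne_nil (b : Bool) (l : List String) (h : ∃ x ∈ l, x ≠ "|") :
    collapse b l ≠ [] := by
  induction l generalizing b with
  | nil => simp at h
  | cons x xs ih =>
    by_cases hx : x = "|"
    · have hxs : ∃ y ∈ xs, y ≠ "|" := by
        rcases h with ⟨y, hy, hne⟩
        rcases List.mem_cons.mp hy with rfl | hy
        · exact absurd hx hne
        · exact ⟨y, hy, hne⟩
      cases b with
      | true => simpa [collapse, hx] using ih true hxs
      | false => simp [collapse, hx]
    · simp [collapse, hx]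

theorem rstrip_has_nonpipe (l : List String) (h : rstrip l ≠ []) :
    ∃ x ∈ rstrip l, x ≠ "|" := by
  induction l with
  | nil => simp [rstrip] at h
  | cons x xs ih =>
    simp only [rstrip] at h ⊢
    split_ifs at h ⊢ with h1 h2
    · simp_all
    · exact ⟨x, by simp, h2⟩
    · rcases ih h1 with ⟨y, hy, hne⟩
      exact ⟨y, by simp [hy], hne⟩

theorem collapse_rstrip_comm (b : Bool) (l : List String) :
    collapse b (rstrip l) = rstrip (collapse b l) := by
  induction l generalizing b with
  | nil => simp [rstrip, collapse]
  | cons x xs ih =>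
    by_cases hx : x = "|"
    · subst hx
      cases b with
      | true =>
        by_cases h1 : rstrip xs = []
        · have e := (ih true).symm
          rw [h1] at e
          simp only [collapse] at e
          simp [rstrip, collapse, h1, e]
        · simp [rstrip, collapse, if_neg h1, ih true]
      | false =>
        by_cases h1 : rstrip xs = []
        · have e := (ih true).symm
          rw [h1] at e
          simp only [collapse] at e
          simp [rstrip, collapse, h1, e]
        · have hne2 : rstrip (collapse true xs) ≠ [] := by
            rw [← ih true]
            exact collapse_ne_nil true _ (rstrip_has_nonpipe xs h1)
          simp [rstrip, collapse, if_neg h1, if_neg hne2, ih true]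
    · by_cases h1 : rstrip xs = []
      · have e := (ih false).symm
        rw [h1] at e
        simp only [collapse] at e
        simp [rstrip, collapse, h1, e, hx]
      · have hne2 : rstrip (collapse false xs) ≠ [] := by
          rw [← ih false]
          exact collapse_ne_nil false _ (rstrip_has_nonpipe xs h1)
        simp only [rstrip, collapse, if_neg h1, if_neg hx, if_neg hne2]
        rw [ih false]

theorem collapse_true_dropWhile (l : List String) :
    collapse true l = collapse false (l.dropWhile (fun x => x == "|")) := by
  induction l with
  | nil => simp [collapse]
  | cons x xs ih =>
    by_cases hx : x = "|"
    · simpa [collapse, hx] using ih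
    · simp [collapse, hx]

theorem rstrip_append (l1 l2 : List String) (h : ∃ x ∈ l2, x ≠ "|") :
    rstrip (l1 ++ l2) = l1 ++ rstrip l2 := by
  have h2 : rstrip l2 ≠ [] := by
    intro hn
    rcases h with ⟨y, hy, hne⟩
    exact hne ((rstrip_eq_nil_iff l2).mp hn y hy)
  induction l1 with
  | nil => simp
  | cons a l1 ih =>
    have hne : l1 ++ rstrip l2 ≠ [] := by simp [h2]
    simp only [List.cons_append, rstrip, ih, if_neg hne]

theorem dropWhile_has_nonpipe (l : List String) (h : ∃ x ∈ l, x ≠ "|") :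
    ∃ x ∈ l.dropWhile (fun x => x == "|"), x ≠ "|" := by
  induction l with
  | nil => simp at h
  | cons x xs ih =>
    rw [List.dropWhile_cons]
    split
    · rename_i hb
      have hx : x = "|" := by simpa using hb
      apply ih
      rcases h with ⟨y, hy, hne⟩
      rcases List.mem_cons.mp hy with rfl | hy
      · exact absurd hx hne
      · exact ⟨y, hy, hne⟩
    · rename_i hb
      have hx : ¬ x = "|" := by simpa using hb
      exact ⟨x, List.mem_cons_self, hx⟩

theorem rstrip_concat (ys : List String) (x : String) :
    rstrip (ys ++ [x]) = if x = "|" then rstrip ys else ys ++ [x] := by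
  induction ys with
  | nil => simp [rstrip]
  | cons y ys ih =>
    simp only [List.cons_append, rstrip, ih]
    split_ifs with h1 h2 h3 <;> simp_all [rstrip]

-- characterizations of the ports
theorem bStrip_eq_rstrip (l : List String) : bStrip l = rstrip l := by
  induction l using List.reverseRecOn with
  | nil => rw [bStrip]; rfl
  | append_singleton ys x ih =>
    rw [bStrip.eq_def]
    split
    · rename_i z hz
      rw [List.getLast?_concat] at hz
      injection hz with hz
      subst hz
      rw [List.dropLast_concat, rstrip_concat]
      split_ifs with h
      · exact ih
      · rfl
    · rename_i hz
      rw [List.getLast?_concat] at hz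
      exact absurd hz (by simp)

theorem loopA2_eq_rstrip (l : List String) : loopA2 l = rstrip l := by
  induction l using List.reverseRecOn with
  | nil => rw [loopA2]; rfl
  | append_singleton ys x ih =>
    rw [loopA2.eq_def]
    split
    · rename_i z hz
      rw [List.getLast?_concat] at hz
      injection hz with hz
      subst hz
      rw [List.dropLast_concat, rstrip_concat]
      split_ifs with h
      · exact ih
      · rfl
    · rename_i hz
      rw [List.getLast?_concat] at hz
      exact absurd hz (by simp)

theorem pvPopIdx_take (rule : List String) (i : Nat) (h : i < rule.length) :
    (pvPopIdx rule i).take i = rule.take i := by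
  rw [pvPopIdx, List.take_append_of_le_length (by simp [Nat.le_of_lt h])]
  simp

theorem pvPopIdx_drop (rule : List String) (i : Nat) (h : i < rule.length) :
    (pvPopIdx rule i).drop i = rule.drop (i + 1) := by
  rw [pvPopIdx, List.drop_append_of_le_length (by simp [Nat.le_of_lt h])]
  simp

theorem loopA1_eq (rule : List String) :
    loopA1 rule = rule.take 2 ++ (rule.drop 2).dropWhile (fun x => x == "|") := by
  induction rule using loopA1.induct with
  | case1 rule h hx ih =>
    rw [loopA1, dif_pos h, if_pos hx, ih, pvPopIdx_take rule 2 h, pvPopIdx_drop rule 2 h]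
    have hd : rule.drop 2 = rule[2] :: rule.drop 3 := List.drop_eq_getElem_cons h
    rw [hd, List.dropWhile_cons, if_pos (by simp [hx])]
  | case2 rule h hx =>
    rw [loopA1, dif_pos h, if_neg hx]
    have hd : rule.drop 2 = rule[2] :: rule.drop 3 := List.drop_eq_getElem_cons h
    rw [hd, List.dropWhile_cons, if_neg (by simp [hx]), ← hd, List.take_append_drop]
  | case3 rule h =>
    rw [loopA1, dif_neg h, List.drop_eq_nil_of_le (by omega)]
    simp [List.take_of_length_le (by omega : rule.length ≤ 2)]

theorem loopA3_eq (b : Bool) (i : Nat) (rule : List String) :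
    loopA3 b i rule = rule.take i ++ collapse b (rule.drop i) := by
  induction b, i, rule using loopA3.induct with
  | case1 pipe i rule h hx ih =>
    obtain ⟨hp, hx2⟩ := hx
    subst hp
    rw [loopA3, dif_pos h, if_pos ⟨rfl, hx2⟩, ih, pvPopIdx_take rule i h,
      pvPopIdx_drop rule i h, List.drop_eq_getElem_cons h]
    have hc : collapse true (rule[i] :: rule.drop (i + 1)) = collapse true (rule.drop (i + 1)) := by
      simp [collapse, hx2]
    rw [hc]
  | case2 pipe i rule h hx1 hx ih =>
    have hp : pipe = false := by
      cases pipe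
      · rfl
      · exact absurd ⟨rfl, hx⟩ hx1
    subst hp
    rw [loopA3, dif_pos h, if_neg hx1, if_pos hx, ih, List.drop_eq_getElem_cons h]
    have hc : collapse false (rule[i] :: rule.drop (i + 1))
        = rule[i] :: collapse true (rule.drop (i + 1)) := by
      simp [collapse, hx]
    rw [hc, List.take_succ_eq_append_getElem h, List.append_assoc, List.singleton_append]
  | case3 pipe i rule h hx1 hx ih =>
    rw [loopA3, dif_pos h, if_neg hx1, if_neg hx, ih, List.drop_eq_getElem_cons h]
    have hc : collapse pipe (rule[i] :: rule.drop (i + 1))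
        = rule[i] :: collapse false (rule.drop (i + 1)) := by
      simp [collapse, hx]
    rw [hc, List.take_succ_eq_append_getElem h, List.append_assoc, List.singleton_append]
  | case4 pipe i rule h =>
    rw [loopA3, dif_neg h, List.drop_eq_nil_of_le (by omega)]
    simp [collapse, List.take_of_length_le (by omega : rule.length ≤ i)]

theorem bScan_eq (body : List String) : bScan body = collapse true body := by
  have key : ∀ (l : List String) (b : Bool) (acc : List String),
      (l.foldl
        (fun (st : Bool × List String) tok =>
          if tok = "|" then (true, if st.1 then st.2 else st.2 ++ [tok])
          else (false, st.2 ++ [tok]))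
        (b, acc)).2 = acc ++ collapse b l := by
    intro l
    induction l with
    | nil => intro b acc; simp [collapse]
    | cons x xs ih =>
      intro b acc
      by_cases hx : x = "|"
      · cases b with
        | true => simp [List.foldl_cons, hx, ih, collapse]
        | false => simp [List.foldl_cons, hx, ih, collapse]
      · simp [List.foldl_cons, hx, ih, collapse]
  simpa [bScan] using key body true []

theorem removeUselessPipes_spec : Claim_equal_removeUselessPipes := by
  intro rule _ hpre
  unfold Spec_removeUselessPipes removeUselessPipes removeUselessPipes_alt
  obtain ⟨w, hw, hwne⟩ := hpre
  have hlen : 2 < rule.length := by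
    by_contra hc
    rw [List.drop_eq_nil_of_le (by omega)] at hw
    simp at hw
  have hnp : ∃ x ∈ (rule.drop 2).dropWhile (fun x => x == "|"), x ≠ "|" :=
    dropWhile_has_nonpipe _ ⟨w, hw, hwne⟩
  rw [loopA1_eq, loopA2_eq_rstrip, bStrip_eq_rstrip, bScan_eq, collapse_true_dropWhile,
    rstrip_append _ _ hnp, loopA3_eq]
  rw [List.take_append_of_le_length (by simp; omega), List.drop_append_of_le_length (by simp; omega)]
  have h2 : (rule.take 2).drop 2 = [] := by
    apply List.drop_eq_nil_of_le
    simp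
  rw [h2, List.nil_append, List.take_take, collapse_rstrip_comm]
  simp
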